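-- pv_equiv track=rewrite | github.com/mirasoth/soothe | src/soothe/ux/core/display_policy.py | _filter_confused_responses
-- ===== SOURCE A (Python) =====
-- CONFUSED_RESPONSE_INDICATORS = [
--     ("sub-questions", ["provide", "share", "empty", "not provided", "actually provided"]),
--     ("sub_questions", ["provide", "share", "empty", "not provided", "actually provided"]),
--     ("section appears to be empty", []),
--     ("once you share them", ["json format"]),
-- ]
--
-- def _filter_confused_responses(text: str) -> str:
--     """Remove confused LLM meta-responses about missing data."""
--     text_lower = text.lower()
--
--     for primary_indicator, secondary_indicators in CONFUSED_RESPONSE_INDICATORS: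
--         if primary_indicator in text_lower and (
--             not secondary_indicators or any(s in text_lower for s in secondary_indicators)
--         ):
--             # Filter line by line
--             lines = text.split("\n")
--             filtered = [line for line in lines if primary_indicator not in line.lower()]
--             text = "\n".join(filtered)
--
--     return text
-- ===== SOURCE B (Python) =====
-- CONFUSED_RESPONSE_INDICATORS = [
--     ("sub-questions", ["provide", "share", "empty", "not provided", "actually provided"]),
--     ("sub_questions", ["provide", "share", "empty", "not provided", "actually provided"]),
--     ("section appears to be empty", []),
--     ("once you share them", ["json format"]),
-- ]
--
--
-- def _filter_confused_responses(text: str) -> str: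
--     """Remove confused LLM meta-responses about missing data."""
--     text_lower = text.lower()
--     active = [
--         primary
--         for primary, secondaries in CONFUSED_RESPONSE_INDICATORS
--         if primary in text_lower
--         and (not secondaries or any(s in text_lower for s in secondaries))
--     ]
--     return "\n".join(
--         line
--         for line in text.split("\n")
--         if not any(p in line.lower() for p in active)
--     )
-- ===== Notes on version B (the rewrite author's own statement) =====
-- stated objective: simpler
-- what changed: Computes the set of active primary indicators once from the original lowercased text, then removes matching lines in a single split/filter/join pass instead of re-splitting, filtering and re-joining the text once per triggered indicator.
import Mathlib
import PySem

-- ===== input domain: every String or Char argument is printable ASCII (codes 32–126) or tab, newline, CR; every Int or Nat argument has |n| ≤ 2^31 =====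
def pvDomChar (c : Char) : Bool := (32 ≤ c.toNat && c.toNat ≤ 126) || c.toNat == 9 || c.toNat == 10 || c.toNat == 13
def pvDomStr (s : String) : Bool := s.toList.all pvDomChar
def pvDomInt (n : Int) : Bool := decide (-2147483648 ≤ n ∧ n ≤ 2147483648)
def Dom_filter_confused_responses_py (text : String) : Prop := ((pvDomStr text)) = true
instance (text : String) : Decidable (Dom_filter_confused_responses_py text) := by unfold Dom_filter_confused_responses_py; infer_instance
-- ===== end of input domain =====

-- B replaces A's per-indicator split/filter/join loop by one activation pass over the
-- indicator table followed by a single split/filter/join pass over the text (objective: simpler).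

-- ===== PORT A =====
-- module constant CONFUSED_RESPONSE_INDICATORS (shared by both Pythons), as (primary, secondaries) char lists
def pvIndicators : List (List Char × List (List Char)) :=
  [("sub-questions".toList, ["provide".toList, "share".toList, "empty".toList, "not provided".toList, "actually provided".toList]),
   ("sub_questions".toList, ["provide".toList, "share".toList, "empty".toList, "not provided".toList, "actually provided".toList]),
   ("section appears to be empty".toList, []),
   ("once you share them".toList, ["json format".toList])]

-- A: text_lower once; for each indicator, if it is active, split the CURRENT text,
-- drop the lines whose lowercase form contains the primary, and re-join.
def filter_confused_responses_py (text : String) : String :=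
  let text_lower := PySem.Chars.lower text.toList
  String.ofList <|
    pvIndicators.foldl
      (fun t pi =>
        if PySem.Chars.isIn pi.1 text_lower &&
           (pi.2.isEmpty || pi.2.any (fun s => PySem.Chars.isIn s text_lower)) then
          let lines := PySem.Chars.splitOn t ['\n']
          let filtered := lines.filter (fun line => !PySem.Chars.isIn pi.1 (PySem.Chars.lower line))
          PySem.Chars.join ['\n'] filtered
        else t)
      text.toList

-- ===== PORT B =====
-- B: collect the active primaries once, then one split / filter / join pass.
def filter_confused_responses_py_alt (text : String) : String :=
  let text_lower := PySem.Chars.lower text.toList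
  let active :=
    (pvIndicators.filter
      (fun pi => PySem.Chars.isIn pi.1 text_lower &&
                 (pi.2.isEmpty || pi.2.any (fun s => PySem.Chars.isIn s text_lower)))).map Prod.fst
  String.ofList <|
    PySem.Chars.join ['\n']
      ((PySem.Chars.splitOn text.toList ['\n']).filter
        (fun line => !active.any (fun p => PySem.Chars.isIn p (PySem.Chars.lower line))))

-- ===== PRECONDITION & SPEC =====
def Spec_filter_confused_responses_py (text : String) (out : String) : Prop := out = filter_confused_responses_py_alt text
instance (text : String) (out : String) : Decidable (Spec_filter_confused_responses_py text out) := by unfold Spec_filter_confused_responses_py; infer_instance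

-- ===== CLAIM (what is proved, stated in full; the proofs are below) =====
def Claim_equal_filter_confused_responses_py : Prop := ∀ (text : String), Dom_filter_confused_responses_py text → Spec_filter_confused_responses_py text (filter_confused_responses_py text)

-- ===== LEMMAS AND PROOFS =====

-- structural model of s.split(c): (head piece, remaining pieces)
def pvSplit (c : Char) : List Char → List Char × List (List Char)
  | [] => ([], [])
  | c' :: rest =>
    let r := pvSplit c rest
    if c' = c then ([], r.1 :: r.2) else (c' :: r.1, r.2)

def pvPieces (c : Char) (s : List Char) : List (List Char) :=
  (pvSplit c s).1 :: (pvSplit c s).2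

lemma pvSplit_go_spec (c : Char) (fuel : Nat) (l cur : List Char) (acc : List (List Char))
    (h : l.length < fuel) :
    PySem.Chars.splitOn.go [c] fuel l cur acc =
      acc.reverse ++ ((cur.reverse ++ (pvSplit c l).1) :: (pvSplit c l).2) := by
  induction fuel generalizing l cur acc with
  | zero => omega
  | succ f ih =>
    cases l with
    | nil => simp [PySem.Chars.splitOn.go, pvSplit]
    | cons c' rest =>
      rw [PySem.Chars.splitOn.go]
      by_cases hc : c' = c
      · subst hc
        simp only [List.isPrefixOf, BEq.rfl, Bool.true_and, if_true,
          List.length_cons, List.length_nil, List.drop_succ_cons, List.drop_zero]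
        rw [ih rest [] ((cur.reverse) :: acc) (by simpa using Nat.lt_of_succ_lt_succ h)]
        simp [pvSplit]
      · have hpre : ([c].isPrefixOf (c' :: rest)) = false := by
          simp [List.isPrefixOf]
          exact fun hh => absurd hh.symm hc
        rw [hpre]
        simp only [Bool.false_eq_true, if_false]
        rw [ih rest (c' :: cur) acc (by simpa using Nat.lt_of_succ_lt_succ h)]
        simp [pvSplit, hc]

lemma splitOn_eq_pvPieces (c : Char) (s : List Char) :
    PySem.Chars.splitOn s [c] = pvPieces c s := by
  show PySem.Chars.splitOn.go [c] (s.length + 1) s [] [] = _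
  rw [pvSplit_go_spec c (s.length + 1) s [] [] (by omega)]
  simp [pvPieces]

lemma pv_join_cons_head (c c' : Char) (h : List Char) (ts : List (List Char)) :
    PySem.Chars.join [c] ((c' :: h) :: ts) = c' :: PySem.Chars.join [c] (h :: ts) := by
  cases ts with
  | nil => simp [PySem.Chars.join_singleton]
  | cons y ys => simp [PySem.Chars.join_cons_cons]

lemma join_pvPieces (c : Char) (s : List Char) :
    PySem.Chars.join [c] (pvPieces c s) = s := by
  induction s with
  | nil => simp [pvPieces, pvSplit, PySem.Chars.join_singleton]
  | cons c' rest ih =>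
    by_cases hc : c' = c
    · subst hc
      simp only [pvPieces, pvSplit, if_true]
      rw [PySem.Chars.join_cons_cons]
      simpa [pvPieces] using ih
    · simp only [pvPieces, pvSplit, hc, if_false]
      rw [pv_join_cons_head]
      simpa [pvPieces] using ih

lemma pvPieces_no_sep (c : Char) (s : List Char) :
    ∀ l ∈ pvPieces c s, c ∉ l := by
  induction s with
  | nil => simp [pvPieces, pvSplit]
  | cons c' rest ih =>
    intro l hl
    by_cases hc : c' = c
    · subst hc
      simp only [pvPieces, pvSplit, if_true, List.mem_cons] at hl
      rcases hl with h | h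
      · subst h; simp
      · exact ih l (by simpa [pvPieces, List.mem_cons] using h)
    · simp only [pvPieces, pvSplit, hc, if_false, List.mem_cons] at hl
      rcases hl with h | h
      · subst h
        intro hmem
        rcases List.mem_cons.mp hmem with h1 | h1
        · exact hc h1.symm
        · exact ih _ (by simp [pvPieces]) h1
      · exact ih l (by simp [pvPieces]; tauto)

lemma pvSplit_append_sep (c : Char) (x t : List Char) (hx : c ∉ x) :
    pvSplit c (x ++ c :: t) = (x, (pvSplit c t).1 :: (pvSplit c t).2) := by
  induction x with
  | nil => simp [pvSplit]
  | cons a x' ih =>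
    have ha : a ≠ c := by intro h; exact hx (by simp [h])
    simp only [List.cons_append, pvSplit, ha, if_false]
    rw [ih (fun h => hx (List.mem_cons_of_mem _ h))]

lemma pvSplit_of_no_sep (c : Char) (x : List Char) (hx : c ∉ x) :
    pvSplit c x = (x, []) := by
  induction x with
  | nil => simp [pvSplit]
  | cons a x' ih =>
    have ha : a ≠ c := by intro h; exact hx (by simp [h])
    simp only [pvSplit, ha, if_false]
    rw [ih (fun h => hx (List.mem_cons_of_mem _ h))]

lemma pvPieces_join (c : Char) (ls : List (List Char)) (h : ls ≠ [])
    (hc : ∀ l ∈ ls, c ∉ l) : pvPieces c (PySem.Chars.join [c] ls) = ls := by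
  induction ls with
  | nil => exact absurd rfl h
  | cons x ls ih =>
    cases ls with
    | nil =>
      rw [PySem.Chars.join_singleton]
      simp [pvPieces, pvSplit_of_no_sep c x (hc x (by simp))]
    | cons y r =>
      rw [PySem.Chars.join_cons_cons]
      have hx : c ∉ x := hc x (by simp)
      have : x ++ [c] ++ PySem.Chars.join [c] (y :: r) = x ++ c :: PySem.Chars.join [c] (y :: r) := by
        simp
      rw [this, pvPieces, pvSplit_append_sep c x _ hx]
      have hrec := ih (by simp) (fun l hl => hc l (List.mem_cons_of_mem _ hl))
      simpa [pvPieces] using hrec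

lemma pv_isIn_nil_false (q : List Char) (hq : q ≠ []) :
    PySem.Chars.isIn q ([] : List Char) = false := by
  rw [PySem.Chars.isIn_eq_false_iff]
  intro hinf
  exact hq (List.eq_nil_of_infix_nil hinf)

lemma pv_foldl_if_filter {α β : Type} (cond : α → Bool) (f : α → β → β) :
    ∀ (l : List α) (t : β),
      l.foldl (fun t a => if cond a then f a t else t) t
        = (l.filter cond).foldl (fun t a => f a t) t := by
  intro l
  induction l with
  | nil => intro t; rfl
  | cons a l ih =>
    intro t
    by_cases ha : cond a = true
    · simp [ha, ih]
    · simp only [Bool.not_eq_true] at ha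
      simp [ha, ih]

lemma pv_main (ps : List (List Char)) (hps : ∀ p ∈ ps, p ≠ []) (t : List Char) :
    ps.foldl
      (fun t p =>
        PySem.Chars.join ['\n']
          ((PySem.Chars.splitOn t ['\n']).filter
            (fun line => !PySem.Chars.isIn p (PySem.Chars.lower line)))) t
    = PySem.Chars.join ['\n']
        ((PySem.Chars.splitOn t ['\n']).filter
          (fun line => !ps.any (fun p => PySem.Chars.isIn p (PySem.Chars.lower line)))) := by
  induction ps generalizing t with
  | nil =>
    simp only [List.foldl_nil, List.any_nil, Bool.not_false, List.filter_true]
    rw [splitOn_eq_pvPieces, join_pvPieces]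
  | cons p ps ih =>
    rw [List.foldl_cons, ih (fun q hq => hps q (List.mem_cons_of_mem _ hq))]
    by_cases hLnil :
        (PySem.Chars.splitOn t ['\n']).filter
          (fun line => !PySem.Chars.isIn p (PySem.Chars.lower line)) = []
    · rw [hLnil, PySem.Chars.join_nil]
      have h1 : PySem.Chars.splitOn ([] : List Char) ['\n'] = [[]] := by
        rw [splitOn_eq_pvPieces]; rfl
      rw [h1]
      have h2 : ([([] : List Char)].filter
          (fun line => !ps.any (fun p => PySem.Chars.isIn p (PySem.Chars.lower line)))) = [[]] := by
        simp only [List.filter_cons, List.filter_nil]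
        have : (ps.any (fun p => PySem.Chars.isIn p (PySem.Chars.lower ([] : List Char)))) = false := by
          rw [List.any_eq_false]
          intro q hq
          simp only [PySem.Chars.lower, List.map_nil]
          simp [pv_isIn_nil_false q (hps q (List.mem_cons_of_mem _ hq))]
        simp [this]
      rw [h2, PySem.Chars.join_singleton]
      have h3 : (PySem.Chars.splitOn t ['\n']).filter
          (fun line => !(p :: ps).any (fun q => PySem.Chars.isIn q (PySem.Chars.lower line))) = [] := by
        rw [List.filter_eq_nil_iff]
        intro line hline
        have hp := List.filter_eq_nil_iff.mp hLnil line hline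
        simp only [Bool.not_eq_true] at hp
        simp [List.any_cons, hp]
      rw [h3, PySem.Chars.join_nil]
    · have hsplit :
          PySem.Chars.splitOn
            (PySem.Chars.join ['\n']
              ((PySem.Chars.splitOn t ['\n']).filter
                (fun line => !PySem.Chars.isIn p (PySem.Chars.lower line)))) ['\n']
          = (PySem.Chars.splitOn t ['\n']).filter
              (fun line => !PySem.Chars.isIn p (PySem.Chars.lower line)) := by
        rw [splitOn_eq_pvPieces, pvPieces_join _ _ hLnil]
        intro l hl
        have hl' : l ∈ PySem.Chars.splitOn t ['\n'] := List.mem_of_mem_filter hl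
        rw [splitOn_eq_pvPieces] at hl'
        exact pvPieces_no_sep '\n' t l hl'
      rw [hsplit, List.filter_filter]
      refine congrArg (PySem.Chars.join ['\n']) (List.filter_congr (fun line _ => ?_))
      simp [List.any_cons, Bool.not_or, Bool.and_comm]

lemma pvIndicators_fst_ne_nil : ∀ pi ∈ pvIndicators, pi.1 ≠ [] := by decide

-- ===== VERDICT (by name: the statement is the Claim_ definition above) =====
theorem filter_confused_responses_py_spec : Claim_equal_filter_confused_responses_py := by
  intro text _
  unfold Spec_filter_confused_responses_py filter_confused_responses_py filter_confused_responses_py_alt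
  simp only []
  refine congrArg String.ofList
    (Eq.trans
      (pv_foldl_if_filter
        (fun pi => PySem.Chars.isIn pi.1 (PySem.Chars.lower text.toList) &&
                   (pi.2.isEmpty || pi.2.any (fun s => PySem.Chars.isIn s (PySem.Chars.lower text.toList))))
        (fun pi t =>
          PySem.Chars.join ['\n']
            ((PySem.Chars.splitOn t ['\n']).filter
              (fun line => !PySem.Chars.isIn pi.1 (PySem.Chars.lower line))))
        pvIndicators text.toList)
      (Eq.trans ?mid
        (pv_main _ (fun p hp => ?hne) text.toList)))
  case mid => rw [List.foldl_map]
  case hne =>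
    rcases List.mem_map.mp hp with ⟨pi, hpi, hfst⟩
    subst hfst
    exact pvIndicators_fst_ne_nil pi (List.mem_of_mem_filter hpi)
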